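-- pv_equiv track=rewrite | github.com/jean50621/Badminton_Challenge | 09_PlayerLocation/inference.py | calculate_vecs
-- ===== SOURCE A (Python) =====
-- def calculate_vecs(infos: dict, max_frames: int):
--     vecs = {}
--     for i in range(max_frames + 1):
--         if i in infos and i-1 in infos:
--             _v = [infos[i][0] - infos[i-1][0], infos[i][1] - infos[i-1][1]]
--             j = 2
--             while i - j > 0:
--                 if i - j not in infos:
--                     j += 1
--                     continue
--                 if _v[0] == 0 and _v[1] == 0:
--                     _v = [infos[i][0] - infos[i-j][0], infos[i][1] - infos[i-j][1]]
--                 else: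
--                     break
--                 j += 1
--             vecs[i] = _v
--     return vecs
-- ===== SOURCE B (Python) =====
-- def calculate_vecs(infos: dict, max_frames: int):
--     # Single increasing pass over the present frames, memoizing for each frame
--     # the nearest earlier present frame whose position differs from its own.
--     vecs = {}
--     prev = None       # previous present frame
--     prev_diff = None  # nearest earlier frame positioned differently from prev
--     for f in sorted(k for k in infos if 0 <= k <= max_frames):
--         pf = infos[f]
--         if prev is None:
--             diff = None
--         elif (infos[prev][0], infos[prev][1]) != (pf[0], pf[1]):
--             diff = prev
--         else:
--             diff = prev_diff
--         if prev == f - 1: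
--             q = infos[f - 1]
--             d = [pf[0] - q[0], pf[1] - q[1]]
--             if d == [0, 0] and diff is not None:
--                 r = infos[diff]
--                 d = [pf[0] - r[0], pf[1] - r[1]]
--             vecs[f] = d
--         prev, prev_diff = f, diff
--     return vecs
-- ===== Notes on version B (the rewrite author's own statement) =====
-- stated objective: alternative
-- what changed: B replaces A's per-frame backwards rescan (a while-loop over all earlier indices for every frame) by one increasing pass over the sorted present frames that memoizes each frame's nearest earlier different-position predecessor, handling each frame in O(1) after sorting the keys; Pre_ excludes dicts holding both keys -1 and 0 (A accidentally reads the out-of-domain key -1 as frame 0's predecessor) and dicts where an in-range frame has fewer than 2 coordinates alongside another in-range frame (Python can raise IndexError there).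
-- intended difference: On inputs where frames i and i-1 (2 <= i <= max_frames) are present with equal positions, every present frame in [1, i-2] has that same position, and frame 0 is present with a different position, A returns [0,0] for frame i because its fallback scan 'while i - j > 0' stops just before frame 0, while B returns the displacement from frame 0 — the nearest earlier different position, which is what the skip-equal-positions fallback intends. — e.g. on calculate_vecs([(0, [1, 1]), (1, [5, 5]), (2, [5, 5])], 2): A returns [(1, [4, 4]), (2, [0, 0])], B returns [(1, [4, 4]), (2, [4, 4])]
-- outside the precondition, e.g. on calculate_vecs({1: [0, 0], 3: [5]}, 5): A returns {}, B raises IndexError; on calculate_vecs({-1: [1, 2], 0: [3, 4]}, 5): A returns {0: [2, 2]}, B returns {}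
import Mathlib
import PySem

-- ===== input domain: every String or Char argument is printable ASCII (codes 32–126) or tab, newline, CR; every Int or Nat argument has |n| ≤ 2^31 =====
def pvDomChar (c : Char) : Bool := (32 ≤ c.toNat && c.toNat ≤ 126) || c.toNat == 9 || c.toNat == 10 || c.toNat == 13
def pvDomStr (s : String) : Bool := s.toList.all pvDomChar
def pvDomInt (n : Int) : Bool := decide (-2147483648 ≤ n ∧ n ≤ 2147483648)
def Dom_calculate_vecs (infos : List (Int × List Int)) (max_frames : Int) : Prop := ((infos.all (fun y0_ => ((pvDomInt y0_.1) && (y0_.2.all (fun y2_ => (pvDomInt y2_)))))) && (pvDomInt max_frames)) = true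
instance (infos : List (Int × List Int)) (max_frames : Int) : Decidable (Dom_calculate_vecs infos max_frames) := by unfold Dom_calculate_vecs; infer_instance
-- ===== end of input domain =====

-- B replaces A's per-frame backwards while-rescan by one increasing pass over the sorted present
-- frames memoizing each frame's nearest earlier different-position predecessor; A and B
-- differ on the D_ inputs below, where A's fallback scan stops just before frame 0.


-- ===== PORT A =====
-- xs[k] for k = 0, 1 on a position list; exact under Pre_ (lists of length ≥ 2, IndexError excluded)
def pvGd (xs : List Int) (k : Int) : Int := (PySem.List.pyGet? xs k).getD 0

-- A's inner `while i - j > 0` loop; _v is a 2-element list carried as its two components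
-- (v0, v1); fuel bounds the iteration count (the loop runs at most (i-2) times).
def pvAWhile (d : PySem.Dict Int (List Int)) (p0 p1 i : Int) (v0 v1 j : Int) : Nat → Int × Int
  | 0 => (v0, v1)
  | fuel + 1 =>
    if 0 < i - j then
      match d.get? (i - j) with
      | none => pvAWhile d p0 p1 i v0 v1 (j + 1) fuel
      | some xs =>
        if v0 = 0 ∧ v1 = 0 then
          pvAWhile d p0 p1 i (p0 - pvGd xs 0) (p1 - pvGd xs 1) (j + 1) fuel
        else (v0, v1)
    else (v0, v1)

def calculate_vecs (infos : List (Int × List Int)) (max_frames : Int) : List (Int × List Int) :=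
  let d := PySem.Dict.ofList infos
  ((PySem.List.pyRange 0 (max_frames + 1) 1).foldl (fun vecs i =>
      match d.get? i, d.get? (i - 1) with
      | some xi, some xim =>
        let v := pvAWhile d (pvGd xi 0) (pvGd xi 1) i
                   (pvGd xi 0 - pvGd xim 0) (pvGd xi 1 - pvGd xim 1) 2 i.toNat
        vecs.insert i [v.1, v.2]
      | _, _ => vecs)
    PySem.Dict.empty).items

-- ===== PORT B =====
-- Source B's computation of diff from (prev, prev_diff) and the current frame's positions pf
def pvCurNd (d : PySem.Dict Int (List Int)) (prev prevNd : Option Int) (pf : List Int) :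
    Option Int :=
  match prev with
  | none => none
  | some p =>
    if (pvGd (d.getD p []) 0, pvGd (d.getD p []) 1) ≠ (pvGd pf 0, pvGd pf 1) then some p
    else prevNd

-- Source B's `vecs` update for frame f
def pvEmit (d : PySem.Dict Int (List Int)) (vecs : PySem.Dict Int (List Int)) (f : Int)
    (prev curNd : Option Int) (pf : List Int) : PySem.Dict Int (List Int) :=
  if prev = some (f - 1) then
    let q := d.getD (f - 1) []
    let dv := [pvGd pf 0 - pvGd q 0, pvGd pf 1 - pvGd q 1]
    if dv = [(0 : Int), 0] then
      match curNd with
      | some k => vecs.insert f [pvGd pf 0 - pvGd (d.getD k []) 0, pvGd pf 1 - pvGd (d.getD k []) 1]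
      | none => vecs.insert f dv
    else vecs.insert f dv
  else vecs

-- one step of B's single pass: state = (vecs, prev, prev_diff)
def pvStep (d : PySem.Dict Int (List Int))
    (st : PySem.Dict Int (List Int) × Option Int × Option Int) (f : Int) :
    PySem.Dict Int (List Int) × Option Int × Option Int :=
  let pf := d.getD f []
  let curNd := pvCurNd d st.2.1 st.2.2 pf
  (pvEmit d st.1 f st.2.1 curNd pf, some f, curNd)

def calculate_vecs_alt (infos : List (Int × List Int)) (max_frames : Int) : List (Int × List Int) :=
  let d := PySem.Dict.ofList infos
  let keys := PySem.List.sorted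
      (d.keys.filter (fun k => decide (0 ≤ k) && decide (k ≤ max_frames))) (fun x => x) false
  ((keys.foldl (pvStep d) (PySem.Dict.empty, none, none)).1).items

-- ===== PRECONDITION & SPEC =====
-- Pre_ excludes dicts containing both the key -1 (a negative frame index outside the natural
-- domain) and the key 0 — there A accidentally reads key -1 as frame 0's predecessor — and
-- dicts where a frame key in [0, max_frames] carries fewer than 2 coordinates while another
-- frame is present in that range (there Python can raise IndexError: B reads every present
-- frame's position, A those its scans reach).
def Pre_calculate_vecs (infos : List (Int × List Int)) (max_frames : Int) : Prop :=
  (∀ p ∈ infos, p.1 = -1 → ∀ q ∈ infos, q.1 ≠ 0) ∧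
  (∀ p ∈ infos, 0 ≤ p.1 → p.1 ≤ max_frames →
    2 ≤ p.2.length ∨ ∀ q ∈ infos, 0 ≤ q.1 → q.1 ≤ max_frames → q.1 = p.1)
instance (infos : List (Int × List Int)) (max_frames : Int) : Decidable (Pre_calculate_vecs infos max_frames) := by unfold Pre_calculate_vecs; infer_instance

def pvWitness_calculate_vecs : (List (Int × List Int)) × Int := ([(0, [1, 2]), (1, [3, 4])], 1)

-- On inputs where frames i and i-1 (2 ≤ i ≤ max_frames) are present with equal positions, every
-- present frame in [1, i-2] has that same position, and frame 0 is present with a different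
-- position, A returns [0,0] for frame i because its fallback scan `while i - j > 0` stops just
-- before frame 0, while B returns the displacement from frame 0 — the nearest earlier different
-- position, which is what the skip-equal-positions fallback intends.
-- frame k's first two coordinates read off the input list (last binding wins, as in a Python
-- dict literal; none = frame absent); used only to state D_
def pvDPos (infos : List (Int × List Int)) (k : Int) : Option (Int × Int) :=
  (infos.reverse.lookup k).map (fun v => (v.getD 0 0, v.getD 1 0))

def D_calculate_vecs (infos : List (Int × List Int)) (max_frames : Int) : Prop :=
  ∃ p ∈ infos,
    2 ≤ p.1 ∧ p.1 ≤ max_frames ∧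
    pvDPos infos p.1 = pvDPos infos (p.1 - 1) ∧
    pvDPos infos 0 ≠ none ∧ pvDPos infos 0 ≠ pvDPos infos p.1 ∧
    (∀ q ∈ infos, 1 ≤ q.1 → q.1 ≤ p.1 - 2 → pvDPos infos q.1 = pvDPos infos p.1)
instance (infos : List (Int × List Int)) (max_frames : Int) : Decidable (D_calculate_vecs infos max_frames) := by unfold D_calculate_vecs; infer_instance

def Spec_calculate_vecs (infos : List (Int × List Int)) (max_frames : Int) (out : List (Int × List Int)) : Prop := ¬ D_calculate_vecs infos max_frames → out = calculate_vecs_alt infos max_frames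
instance (infos : List (Int × List Int)) (max_frames : Int) (out : List (Int × List Int)) : Decidable (Spec_calculate_vecs infos max_frames out) := by unfold Spec_calculate_vecs; infer_instance

def pvDiffWitness_calculate_vecs : (List (Int × List Int)) × Int :=
  ([(0, [1, 1]), (1, [5, 5]), (2, [5, 5])], 2)
def pvDiffWitnessOut_calculate_vecs : (List (Int × List Int)) × (List (Int × List Int)) :=
  ([(1, [4, 4]), (2, [0, 0])], [(1, [4, 4]), (2, [4, 4])])

-- ===== CLAIM (what is proved, stated in full; the proofs are below) =====
def Claim_unchanged_calculate_vecs : Prop := ∀ (infos : List (Int × List Int)) (max_frames : Int), Dom_calculate_vecs infos max_frames → Pre_calculate_vecs infos max_frames → Spec_calculate_vecs infos max_frames (calculate_vecs infos max_frames)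
def Claim_changed_calculate_vecs : Prop := Dom_calculate_vecs (pvDiffWitness_calculate_vecs.1) (pvDiffWitness_calculate_vecs.2) ∧ Pre_calculate_vecs (pvDiffWitness_calculate_vecs.1) (pvDiffWitness_calculate_vecs.2) ∧ D_calculate_vecs (pvDiffWitness_calculate_vecs.1) (pvDiffWitness_calculate_vecs.2) ∧ calculate_vecs (pvDiffWitness_calculate_vecs.1) (pvDiffWitness_calculate_vecs.2) = pvDiffWitnessOut_calculate_vecs.1 ∧ calculate_vecs_alt (pvDiffWitness_calculate_vecs.1) (pvDiffWitness_calculate_vecs.2) = pvDiffWitnessOut_calculate_vecs.2 ∧ pvDiffWitnessOut_calculate_vecs.1 ≠ pvDiffWitnessOut_calculate_vecs.2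
def Claim_exact_calculate_vecs : Prop := ∀ (infos : List (Int × List Int)) (max_frames : Int), Dom_calculate_vecs infos max_frames → Pre_calculate_vecs infos max_frames → D_calculate_vecs infos max_frames → calculate_vecs infos max_frames ≠ calculate_vecs_alt infos max_frames

-- ===== LEMMAS AND PROOFS =====

-- `k in infos` as a Bool
def pvPresent (d : PySem.Dict Int (List Int)) (k : Int) : Bool := (d.get? k).isSome

-- first two coordinates of frame k's position
def pvP2 (d : PySem.Dict Int (List Int)) (k : Int) : Int × Int :=
  (pvGd (d.getD k []) 0, pvGd (d.getD k []) 1)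

-- greatest k in [1, m] present in d with first-two-coordinates ≠ t (A's fallback scan)
def pvNd (d : PySem.Dict Int (List Int)) (m : Int) (t : Int × Int) : Option Int :=
  if h : 0 < m then
    if pvPresent d m = true ∧ pvP2 d m ≠ t then some m else pvNd d (m - 1) t
  else none
termination_by m.toNat
decreasing_by omega

-- greatest k in [0, m] present in d with first-two-coordinates ≠ t (B's memoized scan)
def pvNd0 (d : PySem.Dict Int (List Int)) (m : Int) (t : Int × Int) : Option Int :=
  if h : 0 ≤ m then
    if pvPresent d m = true ∧ pvP2 d m ≠ t then some m else pvNd0 d (m - 1) t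
  else none
termination_by (m + 1).toNat
decreasing_by omega

-- the per-frame value A computes for a frame i with i and i-1 present
def pvF (d : PySem.Dict Int (List Int)) (i : Int) : List Int :=
  let t := pvP2 d i
  let dv := (t.1 - (pvP2 d (i - 1)).1, t.2 - (pvP2 d (i - 1)).2)
  if dv = (0, 0) then
    match pvNd d (i - 2) t with
    | some k => [t.1 - (pvP2 d k).1, t.2 - (pvP2 d k).2]
    | none => [0, 0]
  else [dv.1, dv.2]

-- the per-frame value B computes for a frame i with i and i-1 present
def pvFB (d : PySem.Dict Int (List Int)) (i : Int) : List Int :=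
  let t := pvP2 d i
  let dv := (t.1 - (pvP2 d (i - 1)).1, t.2 - (pvP2 d (i - 1)).2)
  if dv = (0, 0) then
    match pvNd0 d (i - 2) t with
    | some k => [t.1 - (pvP2 d k).1, t.2 - (pvP2 d k).2]
    | none => [dv.1, dv.2]
  else [dv.1, dv.2]

-- A's canonical fold step
def pvG (d : PySem.Dict Int (List Int)) (vecs : PySem.Dict Int (List Int)) (i : Int) :
    PySem.Dict Int (List Int) :=
  if pvPresent d i = true ∧ pvPresent d (i - 1) = true then vecs.insert i (pvF d i) else vecs

-- B's canonical fold step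
def pvGB (d : PySem.Dict Int (List Int)) (vecs : PySem.Dict Int (List Int)) (i : Int) :
    PySem.Dict Int (List Int) :=
  if pvPresent d i = true ∧ 1 ≤ i ∧ pvPresent d (i - 1) = true then vecs.insert i (pvFB d i)
  else vecs

-- the invariant of B's pass at scan position lo
def pvInv (d : PySem.Dict Int (List Int)) (lo : Int) (prev pnd : Option Int) : Prop :=
  match prev with
  | none => ∀ k, 0 ≤ k → k < lo → pvPresent d k = false
  | some p => pvPresent d p = true ∧ 0 ≤ p ∧ p < lo ∧
      (∀ k, p < k → k < lo → pvPresent d k = false) ∧ pnd = pvNd0 d (p - 1) (pvP2 d p)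

lemma pvMemKeys (infos : List (Int × List Int)) (i : Int) :
    i ∈ (PySem.Dict.ofList infos).keys ↔ ∃ p ∈ infos, p.1 = i := by
  show i ∈ (infos.foldl (fun d p => d.insert p.1 p.2) PySem.Dict.empty).keys ↔ _
  rw [PySem.Dict.keys_foldl_insert_key]
  simp [PySem.Set.mem_ofList, PySem.Dict.keys_empty, PySem.Set.update_nil_left, List.mem_map]

lemma pvPresent_iff (infos : List (Int × List Int)) (i : Int) :
    pvPresent (PySem.Dict.ofList infos) i = true ↔ ∃ p ∈ infos, p.1 = i := by
  rw [← pvMemKeys, pvPresent, Option.isSome_iff_ne_none, ne_eq,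
    PySem.Dict.get?_eq_none_iff_not_mem_keys, not_not]

-- the Dict built from infos reads the LAST binding of a key, i.e. find? on the reversed list
lemma get?_ofList_eq (infos : List (Int × List Int)) (k : Int) :
    (PySem.Dict.ofList infos).get? k
      = (infos.reverse.find? (fun p => decide (p.1 = k))).map Prod.snd := by
  induction infos using List.reverseRecOn with
  | nil => rfl
  | append_singleton l p ih =>
    have h1 : PySem.Dict.ofList (l ++ [p]) = (PySem.Dict.ofList l).insert p.1 p.2 := by
      show (l ++ [p]).foldl (fun d q => d.insert q.1 q.2) PySem.Dict.empty = _
      rw [List.foldl_append]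
      rfl
    rw [h1, List.reverse_append]
    by_cases hk : p.1 = k
    · subst hk
      rw [PySem.Dict.get?_insert_self]
      rw [show ([p].reverse ++ l.reverse) = p :: l.reverse from rfl,
        List.find?_cons_of_pos (by simp)]
      rfl
    · rw [PySem.Dict.get?_insert_of_ne _ _ (by omega)]
      rw [show ([p].reverse ++ l.reverse) = p :: l.reverse from rfl,
        List.find?_cons_of_neg (by simp [hk])]
      exact ih

lemma pvGd_getD0 (xs : List Int) : pvGd xs 0 = xs.getD 0 0 := by
  cases xs <;> simp [pvGd, PySem.List.pyGet?, PySem.List.pyIdx?]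

lemma pvGd_getD1 (xs : List Int) : pvGd xs 1 = xs.getD 1 0 := by
  match xs with
  | [] => rfl
  | [a] => rfl
  | a :: b :: t => simp [pvGd, PySem.List.pyGet?, PySem.List.pyIdx?]

lemma pvLookup_eq_find? (l : List (Int × List Int)) (k : Int) :
    List.lookup k l = (l.find? (fun p => decide (p.1 = k))).map Prod.snd := by
  induction l with
  | nil => rfl
  | cons a l ih =>
    rw [List.lookup_cons, List.find?_cons]
    by_cases h : a.1 = k
    · rw [show (k == a.1) = true by simpa using h.symm,
        show decide (a.1 = k) = true by simpa using h]
      rfl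
    · rw [show (k == a.1) = false by simpa using fun hc => h hc.symm,
        show decide (a.1 = k) = false by simpa using h]
      exact ih

lemma pvDPos_eq (infos : List (Int × List Int)) (k : Int) :
    pvDPos infos k
      = ((PySem.Dict.ofList infos).get? k).map (fun v => (pvGd v 0, pvGd v 1)) := by
  unfold pvDPos
  rw [get?_ofList_eq, pvLookup_eq_find?]
  cases infos.reverse.find? (fun p => decide (p.1 = k)) with
  | none => rfl
  | some p => simp [pvGd_getD0, pvGd_getD1]

lemma pvDPos_of_present (infos : List (Int × List Int)) (k : Int)
    (h : pvPresent (PySem.Dict.ofList infos) k = true) :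
    pvDPos infos k = some (pvP2 (PySem.Dict.ofList infos) k) := by
  rw [pvDPos_eq]
  cases hg : (PySem.Dict.ofList infos).get? k with
  | none => rw [pvPresent, hg] at h; exact absurd h (by simp)
  | some v => simp [pvP2, PySem.Dict.getD_eq_get?_getD, hg]

lemma pvDPos_ne_none (infos : List (Int × List Int)) (k : Int)
    (h : pvPresent (PySem.Dict.ofList infos) k = true) : pvDPos infos k ≠ none := by
  rw [pvDPos_of_present infos k h]
  exact Option.some_ne_none _

lemma pvNd_nonpos (d : PySem.Dict Int (List Int)) (m : Int) (t : Int × Int) (h : m ≤ 0) :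
    pvNd d m t = none := by
  rw [pvNd]; rw [dif_neg (by omega)]

lemma pvNd0_neg (d : PySem.Dict Int (List Int)) (m : Int) (t : Int × Int) (h : m < 0) :
    pvNd0 d m t = none := by
  rw [pvNd0]; rw [dif_neg (by omega)]

lemma pvNd0_skip (d : PySem.Dict Int (List Int)) (t : Int × Int) (a m : Int) (ha : a ≤ m)
    (h : ∀ k, a < k → k ≤ m → pvPresent d k = false) : pvNd0 d m t = pvNd0 d a t := by
  induction hn : (m - a).toNat generalizing m with
  | zero => have : m = a := by omega
            subst this; rfl
  | succ n ih =>
    have ham : a < m := by omega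
    rw [pvNd0]
    by_cases h0 : 0 ≤ m
    · rw [dif_pos h0, if_neg (by
        intro ⟨hpm, _⟩
        rw [h m ham le_rfl] at hpm
        exact Bool.false_ne_true hpm)]
      exact ih (m - 1) (by omega) (fun k hk hk' => h k hk (by omega)) (by omega)
    · rw [dif_neg h0, pvNd0_neg d a t (by omega)]

-- relation between A's and B's fallback scans: pvNd0 also sees frame 0
lemma pvNd0_eq (d : PySem.Dict Int (List Int)) (m : Int) (t : Int × Int) :
    pvNd0 d m t = (match pvNd d m t with
      | some k => some k
      | none => if 0 ≤ m ∧ pvPresent d 0 = true ∧ pvP2 d 0 ≠ t then some 0 else none) := by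
  induction hn : (m + 1).toNat generalizing m with
  | zero =>
    rw [pvNd0, dif_neg (by omega), pvNd_nonpos d m t (by omega),
      if_neg (by rintro ⟨hc, -⟩; omega)]
  | succ n ih =>
    by_cases h0 : 0 < m
    · rw [pvNd0, dif_pos (by omega), pvNd, dif_pos h0]
      by_cases hc : pvPresent d m = true ∧ pvP2 d m ≠ t
      · rw [if_pos hc, if_pos hc]
      · rw [if_neg hc, if_neg hc, ih (m - 1) (by omega)]
        cases pvNd d (m - 1) t with
        | some k => rfl
        | none =>
          by_cases hz : pvPresent d 0 = true ∧ pvP2 d 0 ≠ t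
          · rw [if_pos ⟨by omega, hz⟩, if_pos ⟨by omega, hz⟩]
          · rw [if_neg (by intro ⟨_, h⟩; exact hz h), if_neg (by intro ⟨_, h⟩; exact hz h)]
    · by_cases hm : m = 0
      · subst hm
        rw [pvNd0, dif_pos le_rfl, pvNd_nonpos d 0 t le_rfl, pvNd0_neg d (0 - 1) t (by omega)]
        by_cases hz : pvPresent d 0 = true ∧ pvP2 d 0 ≠ t
        · rw [if_pos hz, if_pos ⟨le_rfl, hz⟩]
        · rw [if_neg hz, if_neg (by intro ⟨_, h⟩; exact hz h)]
      · rw [pvNd0_neg d m t (by omega), pvNd_nonpos d m t (by omega), if_neg (by rintro ⟨hc, -⟩; omega)]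

-- when A's scan over [1, m] fails, every present frame there carries position t
lemma pvNd_none (d : PySem.Dict Int (List Int)) (m : Int) (t : Int × Int)
    (h : pvNd d m t = none) :
    ∀ k, 1 ≤ k → k ≤ m → pvPresent d k = true → pvP2 d k = t := by
  induction hn : m.toNat generalizing m with
  | zero => intro k h1 h2 _; omega
  | succ n ih =>
    intro k h1 h2 hp
    rw [pvNd, dif_pos (by omega)] at h
    by_cases hc : pvPresent d m = true ∧ pvP2 d m ≠ t
    · rw [if_pos hc] at h; exact absurd h (by simp)
    · rw [if_neg hc] at h
      by_cases hk : k = m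
      · subst hk
        by_contra hne
        exact hc ⟨hp, hne⟩
      · exact ih (m - 1) h (by omega) k h1 (by omega) hp

lemma pvAWhile_spec (d : PySem.Dict Int (List Int)) (p0 p1 i : Int) :
    ∀ (fuel : Nat) (j v0 v1 : Int), 1 ≤ j → (i - j).toNat ≤ fuel →
    pvAWhile d p0 p1 i v0 v1 j fuel =
      if (v0, v1) = ((0 : Int), (0 : Int)) then
        match pvNd d (i - j) (p0, p1) with
        | some k => (p0 - (pvP2 d k).1, p1 - (pvP2 d k).2)
        | none => (0, 0)
      else (v0, v1) := by
  intro fuel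
  induction fuel with
  | zero =>
    intro j v0 v1 hj hf
    rw [pvNd_nonpos d (i - j) _ (by omega)]
    simp [pvAWhile]
  | succ fuel ih =>
    intro j v0 v1 hj hf
    rw [pvAWhile]
    by_cases hij : 0 < i - j
    · rw [if_pos hij]
      cases hg : d.get? (i - j) with
      | none =>
        have hpre : pvPresent d (i - j) = false := by simp [pvPresent, hg]
        rw [ih (j + 1) v0 v1 (by omega) (by omega)]
        have : pvNd d (i - j) (p0, p1) = pvNd d (i - (j + 1)) (p0, p1) := by
          rw [pvNd, dif_pos hij, if_neg (by
            intro ⟨hpm, _⟩; rw [hpre] at hpm; exact Bool.false_ne_true hpm)]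
          congr 1; omega
        rw [this]
      | some xs =>
        have hpre : pvPresent d (i - j) = true := by simp [pvPresent, hg]
        have hgd : d.getD (i - j) [] = xs := by simp [PySem.Dict.getD_eq_get?_getD, hg]
        have hp2 : pvP2 d (i - j) = (pvGd xs 0, pvGd xs 1) := by
          simp [pvP2, hgd]
        show (if v0 = 0 ∧ v1 = 0 then
                pvAWhile d p0 p1 i (p0 - pvGd xs 0) (p1 - pvGd xs 1) (j + 1) fuel
              else (v0, v1)) = _
        by_cases hv : v0 = 0 ∧ v1 = 0
        · rw [if_pos hv]
          rw [ih (j + 1) _ _ (by omega) (by omega)]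
          obtain ⟨hv0, hv1⟩ := hv; subst hv0; subst hv1
          rw [if_pos rfl]
          by_cases hne : pvP2 d (i - j) ≠ (p0, p1)
          · have hdv : ((p0 - pvGd xs 0, p1 - pvGd xs 1) : Int × Int) ≠ (0, 0) := by
              intro hc
              apply hne
              rw [hp2]
              have h1 : p0 - pvGd xs 0 = 0 := congrArg Prod.fst hc
              have h2 : p1 - pvGd xs 1 = 0 := congrArg Prod.snd hc
              have : pvGd xs 0 = p0 := by omega
              have : pvGd xs 1 = p1 := by omega
              simp_all
            rw [if_neg (by simpa using hdv)]
            rw [show pvNd d (i - j) (p0, p1) = some (i - j) by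
              rw [pvNd, dif_pos hij, if_pos ⟨hpre, hne⟩]]
            simp [hp2]
          · replace hne : pvP2 d (i - j) = (p0, p1) := not_not.mp hne
            have hdv : ((p0 - pvGd xs 0, p1 - pvGd xs 1) : Int × Int) = (0, 0) := by
              rw [hp2] at hne
              have h1 : pvGd xs 0 = p0 := (congrArg Prod.fst hne : _)
              have h2 : pvGd xs 1 = p1 := (congrArg Prod.snd hne : _)
              simp [h1, h2]
            rw [if_pos hdv]
            rw [show pvNd d (i - j) (p0, p1) = pvNd d (i - (j + 1)) (p0, p1) by
              rw [pvNd, dif_pos hij, if_neg (by intro ⟨_, hc⟩; exact hc hne)]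
              congr 1; omega]
        · rw [if_neg hv, if_neg (by
            intro hc
            exact hv ⟨congrArg Prod.fst hc, congrArg Prod.snd hc⟩)]
    · rw [if_neg hij, pvNd_nonpos d (i - j) _ (by omega)]
      split_ifs with h
      · exact h
      · rfl

-- A's fold equals its canonical fold
lemma calc_a_eq (infos : List (Int × List Int)) (M : Int) :
    calculate_vecs infos M =
      ((PySem.List.pyRange 0 (M + 1) 1).foldl (pvG (PySem.Dict.ofList infos))
        PySem.Dict.empty).items := by
  unfold calculate_vecs
  set d := PySem.Dict.ofList infos with hd
  refine congrArg PySem.Dict.items (PySem.List.foldl_congr_mem _ _ _ _ ?_)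
  intro vecs i _
  unfold pvG
  cases h1 : d.get? i with
  | none => simp [pvPresent, h1]
  | some xi =>
    cases h2 : d.get? (i - 1) with
    | none => simp [pvPresent, h1, h2]
    | some xim =>
      have hp1 : pvPresent d i = true := by simp [pvPresent, h1]
      have hp2 : pvPresent d (i - 1) = true := by simp [pvPresent, h2]
      rw [if_pos ⟨hp1, hp2⟩]
      show vecs.insert i _ = vecs.insert i (pvF d i)
      congr 1
      rw [pvAWhile_spec d (pvGd xi 0) (pvGd xi 1) i i.toNat 2 _ _ (by norm_num) (by omega)]
      have e1 : pvP2 d i = (pvGd xi 0, pvGd xi 1) := by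
        simp [pvP2, PySem.Dict.getD_eq_get?_getD, h1]
      have e2 : pvP2 d (i - 1) = (pvGd xim 0, pvGd xim 1) := by
        simp [pvP2, PySem.Dict.getD_eq_get?_getD, h2]
      simp only [pvF, e1, e2]
      split_ifs with hdv
      · cases hnd : pvNd d (i - 2) (pvGd xi 0, pvGd xi 1) <;> simp
      · simp

-- folding pvGB skips non-present frames
lemma foldl_pvGB_filter (d : PySem.Dict Int (List Int)) :
    ∀ (l : List Int) (vecs : PySem.Dict Int (List Int)),
    l.foldl (pvGB d) vecs = (l.filter (fun i => pvPresent d i)).foldl (pvGB d) vecs := by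
  intro l
  induction l with
  | nil => intro vecs; rfl
  | cons a l ih =>
    intro vecs
    rw [List.foldl_cons, List.filter_cons]
    cases hp : pvPresent d a with
    | false =>
      have : pvGB d vecs a = vecs := by
        unfold pvGB
        rw [if_neg (by intro ⟨h, _⟩; rw [hp] at h; exact Bool.false_ne_true h)]
      simp only [Bool.false_eq_true, if_false, this]
      exact ih vecs
    | true =>
      simp only [if_true, List.foldl_cons]
      exact ih (pvGB d vecs a)

-- B's sorted key list is the filtered range
lemma keys_eq_filter (infos : List (Int × List Int)) (M : Int) :
    PySem.List.sorted
      ((PySem.Dict.ofList infos).keys.filter (fun k => decide (0 ≤ k) && decide (k ≤ M)))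
      (fun x => x) false
    = (PySem.List.pyRange 0 (M + 1) 1).filter (fun i => pvPresent (PySem.Dict.ofList infos) i) := by
  set d := PySem.Dict.ofList infos with hd
  apply PySem.List.sorted_eq_of_perm_of_pairwise_lt
  · rw [List.perm_ext_iff_of_nodup
      ((PySem.List.nodup_pyRange_one 0 (M + 1)).filter _)
      ((PySem.Dict.nodup_keys_ofList infos).filter _)]
    intro a
    have hk : pvPresent d a = true ↔ a ∈ d.keys := by
      rw [pvPresent, Option.isSome_iff_ne_none, ne_eq,
        PySem.Dict.get?_eq_none_iff_not_mem_keys, not_not]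
    simp only [List.mem_filter, PySem.List.mem_pyRange_one, hk, Bool.and_eq_true,
      decide_eq_true_eq]
    exact ⟨fun ⟨⟨h1, h2⟩, h3⟩ => ⟨h3, h1, by omega⟩, fun ⟨h3, h1, h2⟩ => ⟨⟨h1, by omega⟩, h3⟩⟩
  · exact (PySem.List.pairwise_lt_pyRange_one 0 (M + 1)).filter _

lemma pvCurNd_eq (d : PySem.Dict Int (List Int)) (lo : Int) (prev pnd : Option Int)
    (h0 : 0 ≤ lo) (hinv : pvInv d lo prev pnd) :
    pvCurNd d prev pnd (d.getD lo []) = pvNd0 d (lo - 1) (pvP2 d lo) := by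
  unfold pvCurNd
  cases prev with
  | none =>
    by_cases h1 : lo = 0
    · subst h1; rw [pvNd0_neg d _ _ (by omega)]
    · rw [pvNd0_skip d _ (-1) (lo - 1) (by omega)
        (fun k hk hk' => hinv k (by omega) (by omega)), pvNd0_neg d (-1) _ (by omega)]
  | some p =>
    show (if pvP2 d p ≠ pvP2 d lo then some p else pnd) = pvNd0 d (lo - 1) (pvP2 d lo)
    obtain ⟨hpp, hp0, hplo, hgap, hpnd⟩ := hinv
    have hskip : pvNd0 d (lo - 1) (pvP2 d lo) = pvNd0 d p (pvP2 d lo) :=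
      pvNd0_skip d _ p (lo - 1) (by omega) (fun k hk hk' => hgap k hk (by omega))
    by_cases hne : pvP2 d p ≠ pvP2 d lo
    · rw [if_pos hne, hskip, pvNd0, dif_pos hp0, if_pos ⟨hpp, hne⟩]
    · rw [if_neg hne]
      replace hne := not_not.mp hne
      rw [hskip, pvNd0, dif_pos hp0, if_neg (fun h => h.2 hne)]
      rw [hne] at hpnd
      exact hpnd

lemma pvEmit_eq (d : PySem.Dict Int (List Int)) (vecs : PySem.Dict Int (List Int)) (lo : Int)
    (prev pnd : Option Int) (_h0 : 0 ≤ lo) (hp : pvPresent d lo = true)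
    (hinv : pvInv d lo prev pnd) :
    pvEmit d vecs lo prev (pvNd0 d (lo - 1) (pvP2 d lo)) (d.getD lo []) = pvGB d vecs lo := by
  unfold pvEmit pvGB
  by_cases hq : prev = some (lo - 1)
  · -- lo - 1 is the previous present frame
    have hguard : pvPresent d lo = true ∧ 1 ≤ lo ∧ pvPresent d (lo - 1) = true := by
      cases prev with
      | none => exact absurd hq (by simp)
      | some p =>
        obtain ⟨hpp, hpge, _, _, _⟩ := hinv
        have hpe : p = lo - 1 := by injection hq
        subst hpe
        exact ⟨hp, by omega, hpp⟩
    rw [if_pos hq, if_pos hguard]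
    have e1 : pvP2 d lo = (pvGd (d.getD lo []) 0, pvGd (d.getD lo []) 1) := rfl
    have e2 : pvP2 d (lo - 1) = (pvGd (d.getD (lo - 1) []) 0, pvGd (d.getD (lo - 1) []) 1) := rfl
    by_cases hdv : [pvGd (d.getD lo []) 0 - pvGd (d.getD (lo - 1) []) 0,
        pvGd (d.getD lo []) 1 - pvGd (d.getD (lo - 1) []) 1] = [(0 : Int), 0]
    · rw [if_pos hdv]
      have h1 : pvGd (d.getD lo []) 0 - pvGd (d.getD (lo - 1) []) 0 = 0 := by
        have := congrArg (fun xs => xs.getD 0 (0 : Int)) hdv; simpa using this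
      have h2 : pvGd (d.getD lo []) 1 - pvGd (d.getD (lo - 1) []) 1 = 0 := by
        have := congrArg (fun xs => xs.getD 1 (0 : Int)) hdv; simpa using this
      have hP2 : pvP2 d (lo - 1) = pvP2 d lo := by
        rw [e1, e2]
        have : pvGd (d.getD (lo - 1) []) 0 = pvGd (d.getD lo []) 0 := by omega
        have : pvGd (d.getD (lo - 1) []) 1 = pvGd (d.getD lo []) 1 := by omega
        simp_all
      have hstep : pvNd0 d (lo - 1) (pvP2 d lo) = pvNd0 d (lo - 2) (pvP2 d lo) := by
        rw [pvNd0, dif_pos (by omega), if_neg (fun h => h.2 hP2)]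
        congr 1
        omega
      have hFB : pvFB d lo = (match pvNd0 d (lo - 2) (pvP2 d lo) with
          | some k => [(pvP2 d lo).1 - (pvP2 d k).1, (pvP2 d lo).2 - (pvP2 d k).2]
          | none => [(pvP2 d lo).1 - (pvP2 d (lo - 1)).1, (pvP2 d lo).2 - (pvP2 d (lo - 1)).2]) := by
        simp only [pvFB]
        rw [if_pos (by rw [e1, e2]; simp only; rw [h1, h2])]
      rw [hstep]
      cases hnd : pvNd0 d (lo - 2) (pvP2 d lo) with
      | some k =>
        rw [hnd] at hFB
        rw [hFB]
        rfl
      | none =>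
        rw [hnd] at hFB
        rw [hFB]
        simp only [e1, e2]
    · rw [if_neg hdv]
      congr 1
      simp only [pvFB, e1, e2]
      rw [if_neg (by
        intro hc
        apply hdv
        have h1 := congrArg Prod.fst hc
        have h2 := congrArg Prod.snd hc
        simp only at h1 h2
        rw [h1, h2])]
  · -- the previous present frame is not lo - 1: both sides skip
    rw [if_neg hq, if_neg (by
      intro ⟨_, hlo1, hc⟩
      cases prev with
      | none =>
        rw [hinv (lo - 1) (by omega) (by omega)] at hc
        exact Bool.false_ne_true hc
      | some p =>
        obtain ⟨_, _, hplo, hgap, _⟩ := hinv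
        have hple : p ≠ lo - 1 := fun h => hq (by rw [h])
        rw [hgap (lo - 1) (by omega) (by omega)] at hc
        exact Bool.false_ne_true hc)]

lemma pvStep_inv (d : PySem.Dict Int (List Int)) (vecs : PySem.Dict Int (List Int)) (lo : Int)
    (prev pnd : Option Int) (h0 : 0 ≤ lo) (hp : pvPresent d lo = true)
    (hinv : pvInv d lo prev pnd) :
    pvStep d (vecs, prev, pnd) lo =
      (pvGB d vecs lo, some lo, pvNd0 d (lo - 1) (pvP2 d lo)) := by
  show (pvEmit d vecs lo prev (pvCurNd d prev pnd (d.getD lo [])) (d.getD lo []), some lo,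
      pvCurNd d prev pnd (d.getD lo [])) = _
  rw [pvCurNd_eq d lo prev pnd h0 hinv, pvEmit_eq d vecs lo prev pnd h0 hp hinv]

-- B's pass over the present frames equals its canonical fold
lemma pvStep_fold (d : PySem.Dict Int (List Int)) (M : Int) :
    ∀ (fuel : Nat) (lo : Int), 0 ≤ lo → (M + 1 - lo).toNat ≤ fuel →
    ∀ (vecs : PySem.Dict Int (List Int)) (prev pnd : Option Int), pvInv d lo prev pnd →
    ((((PySem.List.pyRange lo (M + 1) 1).filter (fun i => pvPresent d i)).foldl (pvStep d)
        (vecs, prev, pnd)).1)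
      = ((PySem.List.pyRange lo (M + 1) 1).filter (fun i => pvPresent d i)).foldl (pvGB d) vecs := by
  intro fuel
  induction fuel with
  | zero =>
    intro lo _ hf vecs prev pnd _
    rw [PySem.List.pyRange_one_eq_nil (by omega)]
    rfl
  | succ fuel ih =>
    intro lo hlo hf vecs prev pnd hinv
    by_cases hlt : lo < M + 1
    · rw [PySem.List.pyRange_one_cons hlt, List.filter_cons]
      cases hp : pvPresent d lo with
      | false =>
        simp only [Bool.false_eq_true, if_false]
        apply ih (lo + 1) (by omega) (by omega)
        cases prev with
        | none =>
          intro k h1 h2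
          by_cases hk : k = lo
          · subst hk; exact hp
          · exact hinv k h1 (by omega)
        | some p =>
          obtain ⟨a, b, c, g, e⟩ := hinv
          exact ⟨a, b, by omega,
            fun k h1 h2 => by
              by_cases hk : k = lo
              · subst hk; exact hp
              · exact g k h1 (by omega), e⟩
      | true =>
        simp only [if_true, List.foldl_cons]
        rw [pvStep_inv d vecs lo prev pnd hlo hp hinv]
        exact ih (lo + 1) (by omega) (by omega) (pvGB d vecs lo) (some lo)
          (pvNd0 d (lo - 1) (pvP2 d lo))
          ⟨hp, hlo, by omega, fun k h1 h2 => absurd h2 (by omega), rfl⟩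
    · rw [PySem.List.pyRange_one_eq_nil (by omega)]
      rfl

-- under Pre_ and outside D_, A's and B's canonical fold steps agree on every frame of the range
lemma pvG_eq_pvGB (infos : List (Int × List Int)) (M : Int)
    (hpre : ∀ p ∈ infos, p.1 = -1 → ∀ q ∈ infos, q.1 ≠ 0) (hD : ¬ D_calculate_vecs infos M)
    (vecs : PySem.Dict Int (List Int)) (i : Int) (hi : i ∈ PySem.List.pyRange 0 (M + 1) 1) :
    pvG (PySem.Dict.ofList infos) vecs i = pvGB (PySem.Dict.ofList infos) vecs i := by
  set d := PySem.Dict.ofList infos with hd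
  rw [PySem.List.mem_pyRange_one] at hi
  unfold pvG pvGB
  by_cases hz : 1 ≤ i
  · -- guards coincide
    by_cases hg : pvPresent d i = true ∧ pvPresent d (i - 1) = true
    · rw [if_pos hg, if_pos ⟨hg.1, hz, hg.2⟩]
      congr 1
      unfold pvF pvFB
      simp only
      by_cases hdv : ((pvP2 d i).1 - (pvP2 d (i - 1)).1, (pvP2 d i).2 - (pvP2 d (i - 1)).2)
          = ((0 : Int), 0)
      · rw [if_pos hdv, if_pos hdv, pvNd0_eq]
        cases hnd : pvNd d (i - 2) (pvP2 d i) with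
        | some k => rfl
        | none =>
          by_cases h0 : 0 ≤ i - 2 ∧ pvPresent d 0 = true ∧ pvP2 d 0 ≠ pvP2 d i
          · -- this is exactly the D_ situation: contradiction with hD
            exfalso
            apply hD
            obtain ⟨pi, hpi, hpie⟩ := (pvPresent_iff infos i).mp hg.1
            refine ⟨pi, hpi, ?_⟩
            rw [hpie]
            have hP2 : pvP2 d i = pvP2 d (i - 1) := by
              have h1 : (pvP2 d i).1 - (pvP2 d (i - 1)).1 = 0 := congrArg Prod.fst hdv
              have h2 : (pvP2 d i).2 - (pvP2 d (i - 1)).2 = 0 := congrArg Prod.snd hdv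
              exact Prod.ext_iff.mpr ⟨by omega, by omega⟩
            refine ⟨by omega, by omega, ?_, pvDPos_ne_none infos 0 h0.2.1, ?_, ?_⟩
            · rw [pvDPos_of_present infos i hg.1, pvDPos_of_present infos (i - 1) hg.2, ← hd, hP2]
            · rw [pvDPos_of_present infos 0 h0.2.1, pvDPos_of_present infos i hg.1, ← hd]
              intro hc
              exact h0.2.2 (Option.some_injective _ hc)
            · intro q hq hq1 hq2
              rw [pvDPos_of_present infos q.1 ((pvPresent_iff infos q.1).mpr ⟨q, hq, rfl⟩),
                pvDPos_of_present infos i hg.1, ← hd]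
              exact congrArg some (pvNd_none d (i - 2) (pvP2 d i) hnd q.1 hq1 hq2
                ((pvPresent_iff infos q.1).mpr ⟨q, hq, rfl⟩))
          · rw [if_neg h0]
            have h1 : (pvP2 d i).1 - (pvP2 d (i - 1)).1 = 0 := congrArg Prod.fst hdv
            have h2 : (pvP2 d i).2 - (pvP2 d (i - 1)).2 = 0 := congrArg Prod.snd hdv
            simp only
            rw [h1, h2]
      · rw [if_neg hdv, if_neg hdv]
    · rw [if_neg hg, if_neg (by intro ⟨a, _, c⟩; exact hg ⟨a, c⟩)]
  · -- i = 0: A's guard asks for frame -1, absent under Pre_; B's guard has 1 ≤ i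
    have hi0 : i = 0 := by omega
    subst hi0
    rw [if_neg (by
        intro ⟨h0p, hc⟩
        obtain ⟨p, hp, hpe⟩ := (pvPresent_iff infos _).mp hc
        obtain ⟨q, hq, hqe⟩ := (pvPresent_iff infos _).mp h0p
        exact hpre p hp (by omega) q hq hqe),
      if_neg (by intro ⟨_, hc, _⟩; omega)]

-- a some-valued pvDPos means the frame is present, with exactly its first two coordinates
lemma pvDPos_some (infos : List (Int × List Int)) (k : Int) (x : Int × Int)
    (h : pvDPos infos k = some x) :
    pvPresent (PySem.Dict.ofList infos) k = true ∧ x = pvP2 (PySem.Dict.ofList infos) k := by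
  rw [pvDPos_eq] at h
  cases hg : (PySem.Dict.ofList infos).get? k with
  | none => rw [hg] at h; exact absurd h (by simp)
  | some v =>
    rw [hg] at h
    refine ⟨by simp [pvPresent, hg], ?_⟩
    have hx : x = (pvGd v 0, pvGd v 1) := (Option.some_injective _ h.symm : _)
    rw [hx]
    simp [pvP2, PySem.Dict.getD_eq_get?_getD, hg]

-- converse of pvNd_none: the scan fails if every present frame in [1, m] carries t
lemma pvNd_none_of (d : PySem.Dict Int (List Int)) (m : Int) (t : Int × Int)
    (h : ∀ k, 1 ≤ k → k ≤ m → pvPresent d k = true → pvP2 d k = t) : pvNd d m t = none := by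
  induction hn : m.toNat generalizing m with
  | zero => exact pvNd_nonpos d m t (by omega)
  | succ n ih =>
    rw [pvNd, dif_pos (by omega), if_neg (by
      intro ⟨hpm, hne⟩
      exact hne (h m (by omega) le_rfl hpm))]
    exact ih (m - 1) (fun k h1 h2 hp => h k h1 (by omega) hp) (by omega)

-- a fold step touches only its own key
lemma get?_foldl_pvG_not_mem (d : PySem.Dict Int (List Int)) (l : List Int) (i : Int)
    (h : i ∉ l) : ∀ vecs, (l.foldl (pvG d) vecs).get? i = vecs.get? i := by
  induction l with
  | nil => intro vecs; rfl
  | cons a l ih =>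
    intro vecs
    rw [List.foldl_cons, ih (fun hm => h (List.mem_cons_of_mem a hm))]
    unfold pvG
    split_ifs with hg
    · exact PySem.Dict.get?_insert_of_ne _ _ (fun he => h (by rw [he]; exact List.mem_cons_self))
    · rfl

lemma get?_foldl_pvGB_not_mem (d : PySem.Dict Int (List Int)) (l : List Int) (i : Int)
    (h : i ∉ l) : ∀ vecs, (l.foldl (pvGB d) vecs).get? i = vecs.get? i := by
  induction l with
  | nil => intro vecs; rfl
  | cons a l ih =>
    intro vecs
    rw [List.foldl_cons, ih (fun hm => h (List.mem_cons_of_mem a hm))]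
    unfold pvGB
    split_ifs with hg
    · exact PySem.Dict.get?_insert_of_ne _ _ (fun he => h (by rw [he]; exact List.mem_cons_self))
    · rfl

lemma get?_foldl_pvG_mem (d : PySem.Dict Int (List Int)) (l : List Int) (i : Int)
    (hnd : l.Nodup) (hm : i ∈ l) (hg : pvPresent d i = true ∧ pvPresent d (i - 1) = true) :
    ∀ vecs, (l.foldl (pvG d) vecs).get? i = some (pvF d i) := by
  induction l with
  | nil => exact absurd hm (by simp)
  | cons a l ih =>
    intro vecs
    rw [List.foldl_cons]
    by_cases hai : a = i
    · subst hai
      rw [get?_foldl_pvG_not_mem d l a (by simp at hnd; exact hnd.1)]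
      unfold pvG
      rw [if_pos hg, PySem.Dict.get?_insert_self]
    · exact ih (List.Nodup.of_cons hnd)
        ((List.mem_cons.mp hm).resolve_left (fun h => hai h.symm)) _

lemma get?_foldl_pvGB_mem (d : PySem.Dict Int (List Int)) (l : List Int) (i : Int)
    (hnd : l.Nodup) (hm : i ∈ l)
    (hg : pvPresent d i = true ∧ 1 ≤ i ∧ pvPresent d (i - 1) = true) :
    ∀ vecs, (l.foldl (pvGB d) vecs).get? i = some (pvFB d i) := by
  induction l with
  | nil => exact absurd hm (by simp)
  | cons a l ih =>
    intro vecs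
    rw [List.foldl_cons]
    by_cases hai : a = i
    · subst hai
      rw [get?_foldl_pvGB_not_mem d l a (by simp at hnd; exact hnd.1)]
      unfold pvGB
      rw [if_pos hg, PySem.Dict.get?_insert_self]
    · exact ih (List.Nodup.of_cons hnd)
        ((List.mem_cons.mp hm).resolve_left (fun h => hai h.symm)) _

-- ===== VERDICT (by name: the statements are the Claim_ definitions above) =====
theorem calculate_vecs_spec : Claim_unchanged_calculate_vecs := by
  intro infos M _ hpre hD
  rw [calc_a_eq, calculate_vecs_alt]
  rw [keys_eq_filter]
  rw [pvStep_fold (PySem.Dict.ofList infos) M (M + 1).toNat 0 (by norm_num) (by omega)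
    PySem.Dict.empty none none (fun k hk hk' => absurd hk' (by omega))]
  rw [← foldl_pvGB_filter]
  exact congrArg PySem.Dict.items
    (PySem.List.foldl_congr_mem _ _ _ _ (fun vecs i hi => pvG_eq_pvGB infos M hpre.1 hD vecs i hi))

theorem calculate_vecs_changed : Claim_changed_calculate_vecs := by
  unfold Claim_changed_calculate_vecs; decide

theorem calculate_vecs_tight : Claim_exact_calculate_vecs := by
  intro infos M _ _ hD heq
  obtain ⟨p, hp, h2, hM, hEq01, hne0, hneq, hall⟩ := hD
  set d := PySem.Dict.ofList infos with hd
  set i := p.1 with hi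
  -- presence and position facts from the D_ conditions
  have hpi : pvPresent d i = true := (pvPresent_iff infos i).mpr ⟨p, hp, rfl⟩
  have hDi : pvDPos infos i = some (pvP2 d i) := pvDPos_of_present infos i hpi
  obtain ⟨hpim, hxim⟩ := pvDPos_some infos (i - 1) (pvP2 d i) (by rw [← hEq01]; exact hDi)
  obtain ⟨x0, hx0⟩ : ∃ x0, pvDPos infos 0 = some x0 := Option.ne_none_iff_exists'.mp hne0
  obtain ⟨hp0, hx0v⟩ := pvDPos_some infos 0 x0 hx0
  have hne0' : pvP2 d 0 ≠ pvP2 d i := by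
    intro hc
    apply hneq
    rw [hx0, hDi, hx0v, hc]
  have hall' : ∀ k, 1 ≤ k → k ≤ i - 2 → pvPresent d k = true → pvP2 d k = pvP2 d i := by
    intro k h1 h2' hpk
    obtain ⟨q, hq, hqe⟩ := (pvPresent_iff infos k).mp hpk
    have := hall q hq (by omega) (by omega)
    rw [hqe, pvDPos_of_present infos k hpk, pvDPos_of_present infos i hpi] at this
    exact Option.some_injective _ this
  -- A's and B's values at frame i differ
  have hdv : ((pvP2 d i).1 - (pvP2 d (i - 1)).1, (pvP2 d i).2 - (pvP2 d (i - 1)).2)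
      = ((0 : Int), 0) := by
    rw [← hxim]; simp
  have hFi : pvF d i = [0, 0] := by
    unfold pvF
    simp only
    rw [if_pos hdv, pvNd_none_of d (i - 2) (pvP2 d i) hall']
  have hFBi : pvFB d i = [(pvP2 d i).1 - (pvP2 d 0).1, (pvP2 d i).2 - (pvP2 d 0).2] := by
    unfold pvFB
    simp only
    rw [if_pos hdv, pvNd0_eq, pvNd_none_of d (i - 2) (pvP2 d i) hall',
      if_pos ⟨by omega, hp0, hne0'⟩]
  have hFne : pvF d i ≠ pvFB d i := by
    rw [hFi, hFBi]
    intro hc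
    apply hne0'
    have c1 := congrArg (fun xs => xs.getD 0 (0 : Int)) hc
    have c2 := congrArg (fun xs => xs.getD 1 (0 : Int)) hc
    simp only [List.getD] at c1 c2
    refine (Prod.ext_iff.mpr ⟨?_, ?_⟩).symm <;> simp at c1 c2 <;> omega
  -- yet equal outputs would force equal values at frame i
  apply hFne
  rw [calc_a_eq, calculate_vecs_alt, keys_eq_filter,
    pvStep_fold d M (M + 1).toNat 0 (by norm_num) (by omega)
      PySem.Dict.empty none none (fun k hk hk' => absurd hk' (by omega)),
    ← foldl_pvGB_filter] at heq
  have hdicts := PySem.Dict.ext heq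
  have hA := get?_foldl_pvG_mem d (PySem.List.pyRange 0 (M + 1) 1) i
    (PySem.List.nodup_pyRange_one 0 (M + 1))
    (PySem.List.mem_pyRange_one.mpr ⟨by omega, by omega⟩)
    ⟨hpi, hpim⟩ PySem.Dict.empty
  have hB := get?_foldl_pvGB_mem d (PySem.List.pyRange 0 (M + 1) 1) i
    (PySem.List.nodup_pyRange_one 0 (M + 1))
    (PySem.List.mem_pyRange_one.mpr ⟨by omega, by omega⟩)
    ⟨hpi, by omega, hpim⟩ PySem.Dict.empty
  rw [hdicts, hB] at hA
  exact Option.some_injective _ hA.symm
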